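-- pv_equiv track=rewrite | github.com/Saegl/dinora | dinora/encoders/policy.py | flip_moves
-- ===== SOURCE A (Python) =====
-- def flip_moves(moves: list[str]) -> list[str]:
--     def flip_move(move: str) -> str:
--         """
--         After horizontal flip of chess board,
--         only vertical components of move affected (files)
--         """
--
--         def flip_file(file: str) -> str:
--             to_num = int(file)
--             flipped = 9 - to_num
--             return str(flipped)
--
--         return "".join([(flip_file(c) if c.isdigit() else c) for c in move])
--
--     return [flip_move(move) for move in moves]
-- ===== SOURCE B (Python) =====
-- def flip_moves(moves: list[str]) -> list[str]:
--     # Staged whole-string passes: perform the five digit swaps 0<->9, 1<->8, ...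
--     # on each move with str.replace, using control-char placeholders (never in
--     # chess move strings) to make each swap in-place safe.
--     out = []
--     for m in moves:
--         for d in range(5):
--             lo, hi, tmp = str(d), str(9 - d), chr(d)
--             m = m.replace(lo, tmp).replace(hi, lo).replace(tmp, hi)
--         out.append(m)
--     return out
-- ===== Notes on version B (the rewrite author's own statement) =====
-- stated objective: alternative
-- what changed: Instead of A's single per-character pass that branches on isdigit and computes str(9-int(c)), B runs five staged whole-string replace passes, one per digit pair, each swapping d and 9-d everywhere via a placeholder character.
import Mathlib
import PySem

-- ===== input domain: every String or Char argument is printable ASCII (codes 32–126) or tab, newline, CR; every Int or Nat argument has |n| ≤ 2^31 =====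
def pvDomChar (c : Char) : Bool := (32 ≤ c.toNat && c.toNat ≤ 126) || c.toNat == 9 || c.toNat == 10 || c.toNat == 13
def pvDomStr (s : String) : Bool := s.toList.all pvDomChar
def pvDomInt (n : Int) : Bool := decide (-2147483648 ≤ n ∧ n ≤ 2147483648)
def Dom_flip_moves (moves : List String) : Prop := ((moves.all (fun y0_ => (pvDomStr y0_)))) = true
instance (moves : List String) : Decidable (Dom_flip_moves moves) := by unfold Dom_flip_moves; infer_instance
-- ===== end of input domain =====

-- B replaces A's per-character isdigit/int/str pass by five staged whole-string
-- replace passes, one per digit pair d <-> 9-d, swapped via a control-char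
-- placeholder (never in Dom strings); objective: alternative.

-- ===== PORT A =====
-- int(file); .getD 0 is only a totality guard: flip_file is called only on a digit, where ofStr? is some
def pvFlipFile (file : String) : String :=
  PySem.Int.toStr (9 - (PySem.Int.ofStr? file).getD 0)

def pvFlipMove (move : String) : String :=
  PySem.Str.join "" (move.toList.map (fun c =>
    if PySem.Chars.isdigit c then pvFlipFile (String.ofList [c]) else String.ofList [c]))

def flip_moves (moves : List String) : List String :=
  moves.map pvFlipMove

-- ===== PORT B =====
-- the inner 'for d in range(5)' loop: three replaces swap str(d) and str(9-d) via the
-- placeholder chr(d); chr(d) ported by hand as Char.ofNat d.toNat (exact for 0 ≤ d < 0x110000)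
def pvFlipStaged (m : String) : String :=
  (PySem.List.pyRange 0 5 1).foldl
    (fun m d =>
      let lo := PySem.Int.toStr d
      let hi := PySem.Int.toStr (9 - d)
      let tmp := String.ofList [Char.ofNat d.toNat]
      PySem.Str.replace (PySem.Str.replace (PySem.Str.replace m lo tmp) hi lo) tmp hi)
    m

def flip_moves_alt (moves : List String) : List String :=
  moves.foldl (fun out m => out ++ [pvFlipStaged m]) []

-- ===== PRECONDITION & SPEC =====
def Spec_flip_moves (moves : List String) (out : List String) : Prop := out = flip_moves_alt moves
instance (moves : List String) (out : List String) : Decidable (Spec_flip_moves moves out) := by unfold Spec_flip_moves; infer_instance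

-- ===== CLAIM (what is proved, stated in full; the proofs are below) =====
def Claim_equal_flip_moves : Prop := ∀ (moves : List String), Dom_flip_moves moves → Spec_flip_moves moves (flip_moves moves)

-- ===== LEMMAS AND PROOFS =====

-- single-character replace is a character map
theorem pv_go_single (a b : Char) (l : List Char) :
    ∀ (fuel : Nat) (acc : List Char), l.length ≤ fuel →
      PySem.Chars.replace.go [a] [b] fuel l acc
        = acc.reverse ++ l.map (fun c => if c == a then b else c) := by
  induction l with
  | nil =>
    intro fuel acc _
    cases fuel <;> simp [PySem.Chars.replace.go]
  | cons c t ih =>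
    intro fuel acc h
    cases fuel with
    | zero => simp at h
    | succ n =>
      by_cases hca : a = c
      · subst hca
        rw [show PySem.Chars.replace.go [a] [b] (n+1) (a :: t) acc
              = PySem.Chars.replace.go [a] [b] n t (b :: acc) by
            simp [PySem.Chars.replace.go, List.isPrefixOf]]
        rw [ih n (b :: acc) (by simpa using h)]
        simp
      · rw [show PySem.Chars.replace.go [a] [b] (n+1) (c :: t) acc
              = PySem.Chars.replace.go [a] [b] n t (c :: acc) by
            simp [PySem.Chars.replace.go, List.isPrefixOf, hca]]
        rw [ih n (c :: acc) (by simpa using h)]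
        simp [Ne.symm hca]

theorem pv_replace_single (a b : Char) (s : List Char) :
    PySem.Chars.replace s [a] [b] = s.map (fun c => if c == a then b else c) := by
  rw [show PySem.Chars.replace s [a] [b]
        = PySem.Chars.replace.go [a] [b] s.length s [] by
      simp [PySem.Chars.replace]]
  simpa using pv_go_single a b s s.length [] le_rfl

theorem pv_isdigit_cases (c : Char) (h : PySem.Chars.isdigit c = true) :
    c = '0' ∨ c = '1' ∨ c = '2' ∨ c = '3' ∨ c = '4' ∨ c = '5' ∨ c = '6' ∨ c = '7' ∨ c = '8' ∨ c = '9' := by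
  simp [PySem.Chars.isdigit, Char.le_def, UInt32.le_iff_toNat_le] at h
  have hv : c.toNat = 48 ∨ c.toNat = 49 ∨ c.toNat = 50 ∨ c.toNat = 51 ∨ c.toNat = 52 ∨ c.toNat = 53 ∨ c.toNat = 54 ∨ c.toNat = 55 ∨ c.toNat = 56 ∨ c.toNat = 57 := by omega
  have hE : ∀ d : Char, c.toNat = d.toNat → c = d := by
    intro d hd; apply Char.ext; exact UInt32.toNat_inj.mp hd
  rcases hv with h|h|h|h|h|h|h|h|h|h
  · exact Or.inl (hE '0' h)
  · exact Or.inr <| Or.inl (hE '1' h)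
  · exact Or.inr <| Or.inr <| Or.inl (hE '2' h)
  · exact Or.inr <| Or.inr <| Or.inr <| Or.inl (hE '3' h)
  · exact Or.inr <| Or.inr <| Or.inr <| Or.inr <| Or.inl (hE '4' h)
  · exact Or.inr <| Or.inr <| Or.inr <| Or.inr <| Or.inr <| Or.inl (hE '5' h)
  · exact Or.inr <| Or.inr <| Or.inr <| Or.inr <| Or.inr <| Or.inr <| Or.inl (hE '6' h)
  · exact Or.inr <| Or.inr <| Or.inr <| Or.inr <| Or.inr <| Or.inr <| Or.inr <| Or.inl (hE '7' h)
  · exact Or.inr <| Or.inr <| Or.inr <| Or.inr <| Or.inr <| Or.inr <| Or.inr <| Or.inr <| Or.inl (hE '8' h)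
  · exact Or.inr <| Or.inr <| Or.inr <| Or.inr <| Or.inr <| Or.inr <| Or.inr <| Or.inr <| Or.inr (hE '9' h)

-- per-character effect of one staged swap pass (the three single-char replaces for pair lo/hi)
def pvSwap (lo tmp hi : Char) (c : Char) : Char :=
  let a := if c == lo then tmp else c
  let b := if a == hi then lo else a
  if b == tmp then hi else b

-- composed per-character effect of the five staged passes
def pvStagedChar (c : Char) : Char :=
  pvSwap '4' (Char.ofNat 4) '5'
    (pvSwap '3' (Char.ofNat 3) '6'
      (pvSwap '2' (Char.ofNat 2) '7'
        (pvSwap '1' (Char.ofNat 1) '8'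
          (pvSwap '0' (Char.ofNat 0) '9' c))))

theorem pv_swap_map (lo tmp hi : Char) (s : List Char) :
    PySem.Chars.replace (PySem.Chars.replace (PySem.Chars.replace s [lo] [tmp]) [hi] [lo]) [tmp] [hi]
      = s.map (pvSwap lo tmp hi) := by
  simp only [pv_replace_single, List.map_map]
  exact List.map_congr_left (fun c _ => rfl)

theorem pv_staged_toList (m : String) :
    (pvFlipStaged m).toList = m.toList.map pvStagedChar := by
  have h5 : PySem.List.pyRange 0 5 1 = [(0:Int),1,2,3,4] := by decide
  have c0 : (PySem.Int.toStr (0:Int)).toList = ['0'] := by decide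
  have c1 : (PySem.Int.toStr (1:Int)).toList = ['1'] := by decide
  have c2 : (PySem.Int.toStr (2:Int)).toList = ['2'] := by decide
  have c3 : (PySem.Int.toStr (3:Int)).toList = ['3'] := by decide
  have c4 : (PySem.Int.toStr (4:Int)).toList = ['4'] := by decide
  have c5 : (PySem.Int.toStr (9-(4:Int))).toList = ['5'] := by decide
  have c6 : (PySem.Int.toStr (9-(3:Int))).toList = ['6'] := by decide
  have c7 : (PySem.Int.toStr (9-(2:Int))).toList = ['7'] := by decide
  have c8 : (PySem.Int.toStr (9-(1:Int))).toList = ['8'] := by decide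
  have c9 : (PySem.Int.toStr (9-(0:Int))).toList = ['9'] := by decide
  have tn : ∀ n : Nat, Int.toNat (OfNat.ofNat n) = OfNat.ofNat n := fun n => rfl
  unfold pvFlipStaged
  rw [h5]
  simp only [List.foldl_cons, List.foldl_nil, PySem.Str.replace, String.toList_ofList,
    c0, c1, c2, c3, c4, c5, c6, c7, c8, c9, tn, pv_swap_map, List.map_map]
  have hf : (pvSwap '4' (Char.ofNat 4) '5' ∘ pvSwap '3' (Char.ofNat 3) '6' ∘
        pvSwap '2' (Char.ofNat 2) '7' ∘ pvSwap '1' (Char.ofNat 1) '8' ∘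
        pvSwap '0' (Char.ofNat 0) '9') = pvStagedChar := by
    funext c
    simp only [Function.comp_apply, pvStagedChar]
  rw [hf]

theorem pv_swap_id (lo tmp hi c : Char) (h1 : (c == lo) = false) (h2 : (c == hi) = false)
    (h3 : (c == tmp) = false) : pvSwap lo tmp hi c = c := by
  simp [pvSwap, h1, h2, h3]

theorem pv_char_agree (c : Char) (hd : pvDomChar c = true) :
    (if PySem.Chars.isdigit c then pvFlipFile (String.ofList [c]) else String.ofList [c]).toList
      = [pvStagedChar c] := by
  by_cases h : PySem.Chars.isdigit c = true
  · rcases pv_isdigit_cases c h with h'|h'|h'|h'|h'|h'|h'|h'|h'|h' <;> subst h' <;> decide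
  · rw [if_neg h]
    have hnum := hd
    simp [pvDomChar] at hnum
    simp [PySem.Chars.isdigit, Char.le_def, UInt32.le_iff_toNat_le] at h
    have hx : ∀ (x : Char), c.toNat ≠ x.toNat → (c == x) = false := by
      intro x hxx
      simp only [beq_eq_false_iff_ne]
      intro he; exact hxx (he ▸ rfl)
    have e0 : ('0' : Char).toNat = 48 := rfl
    have e9 : ('9' : Char).toNat = 57 := rfl
    have hdig : c.toNat < 48 ∨ 57 < c.toNat := by omega
    have hne : ∀ (x : Char), (48 ≤ x.toNat ∧ x.toNat ≤ 57) ∨ x.toNat ≤ 4 → (c == x) = false := by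
      intro x hxr
      exact hx x (by omega)
    have hid : pvStagedChar c = c := by
      have s0 := pv_swap_id '0' (Char.ofNat 0) '9' c (hne _ (by decide)) (hne _ (by decide)) (hne _ (by decide))
      have s1 := pv_swap_id '1' (Char.ofNat 1) '8' c (hne _ (by decide)) (hne _ (by decide)) (hne _ (by decide))
      have s2 := pv_swap_id '2' (Char.ofNat 2) '7' c (hne _ (by decide)) (hne _ (by decide)) (hne _ (by decide))
      have s3 := pv_swap_id '3' (Char.ofNat 3) '6' c (hne _ (by decide)) (hne _ (by decide)) (hne _ (by decide))
      have s4 := pv_swap_id '4' (Char.ofNat 4) '5' c (hne _ (by decide)) (hne _ (by decide)) (hne _ (by decide))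
      simp only [pvStagedChar, s0, s1, s2, s3, s4]
    simp [hid]

theorem pv_move_agree (m : String) (hd : pvDomStr m = true) :
    pvFlipMove m = pvFlipStaged m := by
  have hall : ∀ c ∈ m.toList, pvDomChar c = true := by
    simpa [pvDomStr, List.all_eq_true] using hd
  have hL : (pvFlipMove m).toList = (pvFlipStaged m).toList := by
    unfold pvFlipMove
    rw [PySem.Str.toList_join, pv_staged_toList]
    have : (m.toList.map (fun c =>
        if PySem.Chars.isdigit c then pvFlipFile (String.ofList [c]) else String.ofList [c])).map String.toList
        = (m.toList.map pvStagedChar).map (fun c => [c]) := by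
      simp only [List.map_map]
      exact List.map_congr_left (fun c hc => pv_char_agree c (hall c hc))
    rw [this]
    exact PySem.Chars.join_nil_singletons _
  apply String.toList_inj.mp
  simpa using hL

theorem pv_foldl_append (l : List String) :
    ∀ acc, l.foldl (fun out m => out ++ [pvFlipStaged m]) acc = acc ++ l.map pvFlipStaged := by
  induction l with
  | nil => intro acc; simp
  | cons x t ih => intro acc; simp [List.foldl, ih]

-- ===== VERDICT (by name: the statement is the Claim_ definition above) =====
theorem flip_moves_spec : Claim_equal_flip_moves := by
  intro moves hdom
  have hall : ∀ m ∈ moves, pvDomStr m = true := by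
    simpa [Dom_flip_moves, List.all_eq_true] using hdom
  unfold Spec_flip_moves flip_moves flip_moves_alt
  rw [pv_foldl_append moves []]
  simpa using List.map_congr_left (fun m hm => pv_move_agree m (hall m hm))
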